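-- pv_equiv track=rewrite | github.com/jatanjay/InformationRetrieval | P3/P3python/src/retrieve.py | qOr
-- ===== SOURCE A (Python) =====
-- def find_adjacent_positions(positions_a, positions_b):
--     adjacent_positions = []
--     for pos_a in positions_a:
--         for pos_b in positions_b:
--             if pos_b == pos_a + 1:
--                 adjacent_positions.append(pos_b)
--     return adjacent_positions
--
-- def find_positions_for_phrase(phrase, invertedIndex):
--     positions = set()
--     words = phrase.split()
--     if len(words) == 1:
--         return set(invertedIndex.get(phrase, {}).keys())
--
--     for doc_id, doc_positions in invertedIndex.get(words[0], {}).items():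
--         for i in range(1, len(words)):
--             next_word_positions = set(invertedIndex.get(words[i], {}).get(doc_id, []))
--             doc_positions = find_adjacent_positions(doc_positions, next_word_positions)
--
--         if doc_positions:
--             positions.add(doc_id)
--     return positions
--
-- def qOr(invertedIndex, search_terms):
--     first_term = search_terms[0]
--     result = set()
--
--     if first_term:
--         for term in search_terms:
--             term_positions = find_positions_for_phrase(term, invertedIndex)
--             result = result.union(term_positions)
--
--     return sorted(result)
-- ===== SOURCE B (Python) =====
-- def qOr(invertedIndex, search_terms):
--     # Return value only; same IndexError behaviour as A on empty search_terms /
--     # whitespace-only multi-lookup terms is outside Pre_.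
--     if not search_terms[0]:
--         return []
--     result = set()
--     for term in search_terms:
--         words = term.split()
--         if len(words) == 1:
--             result.update(invertedIndex.get(term, {}).keys())
--         else:
--             offset_dicts = [invertedIndex.get(w, {}) for w in words[1:]]
--             for doc_id, starts in invertedIndex.get(words[0], {}).items():
--                 possets = [set(d.get(doc_id, ())) for d in offset_dicts]
--                 if any(all(p + i + 1 in possets[i] for i in range(len(possets)))
--                        for p in starts):
--                     result.add(doc_id)
--     return sorted(result)
-- ===== Notes on version B (the rewrite author's own statement) =====
-- stated objective: faster
-- what changed: A matches a phrase by repeatedly rebuilding the surviving-position list with a nested-loop adjacency pass per word (find_adjacent_positions compares every surviving position with every position of the next word); B instead checks each start position of the first word directly against precomputed per-word position sets (any/all with O(1) set membership), removing the chained list reconstruction and its nested scan.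
import Mathlib
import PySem

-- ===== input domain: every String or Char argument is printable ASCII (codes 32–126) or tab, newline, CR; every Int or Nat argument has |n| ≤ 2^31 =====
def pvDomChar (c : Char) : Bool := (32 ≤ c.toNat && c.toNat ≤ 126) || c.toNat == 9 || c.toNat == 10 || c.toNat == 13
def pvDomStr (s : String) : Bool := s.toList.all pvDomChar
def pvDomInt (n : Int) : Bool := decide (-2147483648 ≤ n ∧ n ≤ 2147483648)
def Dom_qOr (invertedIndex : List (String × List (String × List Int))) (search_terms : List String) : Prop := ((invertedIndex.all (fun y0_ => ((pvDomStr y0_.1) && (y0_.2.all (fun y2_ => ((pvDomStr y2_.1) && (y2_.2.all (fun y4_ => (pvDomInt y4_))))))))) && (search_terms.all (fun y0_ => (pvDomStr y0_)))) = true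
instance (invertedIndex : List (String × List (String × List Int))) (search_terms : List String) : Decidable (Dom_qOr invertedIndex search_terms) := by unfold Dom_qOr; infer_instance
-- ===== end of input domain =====

-- B replaces A's repeated adjacency-list chaining (find_adjacent_positions, a nested scan
-- rebuilt per word) with a direct start-position check against per-word position sets: a doc
-- matches a phrase iff some start position p of the first word has p+i in the i-th word's
-- position set for every offset i (objective: faster, measured).

-- ===== PORT A =====
def findAdjacentPositions (positionsA : List Int) (positionsB : List Int) : List Int :=
  positionsA.foldl (fun adjacent posA =>
    positionsB.foldl (fun adjacent posB =>
      if posB == posA + 1 then adjacent ++ [posB] else adjacent) adjacent) []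

def findPositionsForPhrase (phrase : String)
    (invertedIndex : List (String × List (String × List Int))) : PySem.Set String :=
  let words := PySem.Str.split₀ phrase
  if words.length = 1 then
    PySem.Set.ofList (PySem.Dict.mk (PySem.Dict.getD (PySem.Dict.mk invertedIndex) phrase [])).keys
  else
    (PySem.Dict.mk (PySem.Dict.getD (PySem.Dict.mk invertedIndex) (PySem.List.pyGetD words 0 "") [])).items.foldl
      (fun positions item =>
        let docPositions :=
          (PySem.List.pyRange 1 (words.length : Int) 1).foldl
            (fun docPositions i =>
              let nextWordPositions : PySem.Set Int :=
                PySem.Set.ofList (PySem.Dict.getD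
                  (PySem.Dict.mk (PySem.Dict.getD (PySem.Dict.mk invertedIndex) (PySem.List.pyGetD words i "") []))
                  item.1 [])
              findAdjacentPositions docPositions nextWordPositions)
            item.2
        if !docPositions.isEmpty then PySem.Set.add positions item.1 else positions)
      PySem.Set.empty

def qOr (invertedIndex : List (String × List (String × List Int))) (search_terms : List String) : List String :=
  let firstTerm := PySem.List.pyGetD search_terms 0 ""
  let result : PySem.Set String := PySem.Set.empty
  let result :=
    if firstTerm ≠ "" then
      search_terms.foldl (fun result term =>
        PySem.Set.union result (findPositionsForPhrase term invertedIndex)) result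
    else result
  PySem.List.sorted result (fun x => x) false

-- ===== PORT B =====
def qOr_alt (invertedIndex : List (String × List (String × List Int))) (search_terms : List String) : List String :=
  if PySem.List.pyGetD search_terms 0 "" = "" then []
  else
    let result := search_terms.foldl (fun result term =>
      let words := PySem.Str.split₀ term
      if words.length = 1 then
        PySem.Set.update result (PySem.Dict.mk (PySem.Dict.getD (PySem.Dict.mk invertedIndex) term [])).keys
      else
        let offsetDicts := (words.drop 1).map (fun w => PySem.Dict.getD (PySem.Dict.mk invertedIndex) w [])
        (PySem.Dict.mk (PySem.Dict.getD (PySem.Dict.mk invertedIndex) (PySem.List.pyGetD words 0 "") [])).items.foldl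
          (fun result item =>
            let possets := offsetDicts.map (fun d =>
              PySem.Set.ofList (PySem.Dict.getD (PySem.Dict.mk d) item.1 []))
            if item.2.any (fun p =>
                 (PySem.List.pyRange 0 (possets.length : Int) 1).all (fun i =>
                   PySem.Set.contains (PySem.List.pyGetD possets i PySem.Set.empty) (p + i + 1)))
            then PySem.Set.add result item.1 else result)
          result) PySem.Set.empty
    PySem.List.sorted result (fun x => x) false

-- ===== PRECONDITION & SPEC =====
-- Pre_ excludes exactly the inputs on which the Python A raises IndexError: empty
-- search_terms (search_terms[0]), and — when the first term is non-empty — a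
-- whitespace-only term, i.e. one that strips to "" so its split() is empty
-- (words[0] in find_positions_for_phrase). B raises there as well.
def Pre_qOr (invertedIndex : List (String × List (String × List Int))) (search_terms : List String) : Prop :=
  search_terms ≠ [] ∧
    (search_terms.headD "" ≠ "" → ∀ t ∈ search_terms, PySem.Str.strip t ≠ "")
instance (invertedIndex : List (String × List (String × List Int))) (search_terms : List String) : Decidable (Pre_qOr invertedIndex search_terms) := by unfold Pre_qOr; infer_instance

def pvWitness_qOr : (List (String × List (String × List Int))) × List String :=
  ([("a", [("d1", [0, 5]), ("d2", [2])]), ("b", [("d1", [1]), ("d3", [0])])], ["a b", "b"])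

def Spec_qOr (invertedIndex : List (String × List (String × List Int))) (search_terms : List String) (out : List String) : Prop := out = qOr_alt invertedIndex search_terms
instance (invertedIndex : List (String × List (String × List Int))) (search_terms : List String) (out : List String) : Decidable (Spec_qOr invertedIndex search_terms out) := by unfold Spec_qOr; infer_instance

-- ===== CLAIM (what is proved, stated in full; the proofs are below) =====
def Claim_equal_qOr : Prop := ∀ (invertedIndex : List (String × List (String × List Int))) (search_terms : List String), Dom_qOr invertedIndex search_terms → Pre_qOr invertedIndex search_terms → Spec_qOr invertedIndex search_terms (qOr invertedIndex search_terms)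

-- ===== LEMMAS AND PROOFS =====

-- the position set of the word at (Nat) index j, for one document
def posSetOf (inv : List (String × List (String × List Int))) (words : List String)
    (docId : String) (j : Nat) : PySem.Set Int :=
  PySem.Set.ofList (PySem.Dict.getD
    (PySem.Dict.mk (PySem.Dict.getD (PySem.Dict.mk inv) (words.getD j "") [])) docId [])

-- a document matches a multi-word phrase: some start position chains through all offsets
def CondDoc (inv : List (String × List (String × List Int))) (words : List String)
    (item : String × List Int) : Prop :=
  ∃ p ∈ item.2, ∀ j : Nat, j + 1 < words.length → p + (j : Int) + 1 ∈ posSetOf inv words item.1 (j + 1)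

-- what one search term contributes to the result set (both programs)
def QTerm (inv : List (String × List (String × List Int))) (t : String) (x : String) : Prop :=
  if (PySem.Str.split₀ t).length = 1 then
    x ∈ (PySem.Dict.mk (PySem.Dict.getD (PySem.Dict.mk inv) t [])).keys
  else
    ∃ item ∈ (PySem.Dict.mk (PySem.Dict.getD (PySem.Dict.mk inv)
        (PySem.List.pyGetD (PySem.Str.split₀ t) 0 "") [])).items,
      CondDoc inv (PySem.Str.split₀ t) item ∧ x = item.1

lemma mem_foldl_accum {α β : Type} (f : List α → β → List α) (Q : β → α → Prop) :
    ∀ (l : List β) (s : List α) (x : α),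
      (∀ t ∈ l, ∀ r y, y ∈ f r t ↔ y ∈ r ∨ Q t y) →
      (x ∈ l.foldl f s ↔ x ∈ s ∨ ∃ t ∈ l, Q t x) := by
  intro l
  induction l with
  | nil => intro s x _; simp
  | cons t l ih =>
    intro s x h
    simp only [List.foldl_cons]
    rw [ih _ _ (fun u hu => h u (List.mem_cons_of_mem _ hu)),
        h t List.mem_cons_self]
    simp only [List.mem_cons]
    constructor
    · rintro ((h1 | h1) | ⟨u, hu, hq⟩)
      · exact Or.inl h1
      · exact Or.inr ⟨t, Or.inl rfl, h1⟩
      · exact Or.inr ⟨u, Or.inr hu, hq⟩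
    · rintro (h1 | ⟨u, (rfl | hu), hq⟩)
      · exact Or.inl (Or.inl h1)
      · exact Or.inl (Or.inr hq)
      · exact Or.inr ⟨u, hu, hq⟩

lemma nodup_foldl_accum {α β : Type} (f : List α → β → List α) :
    ∀ (l : List β) (s : List α),
      (∀ t ∈ l, ∀ r, r.Nodup → (f r t).Nodup) → s.Nodup → (l.foldl f s).Nodup := by
  intro l
  induction l with
  | nil => intro s _ hs; simpa using hs
  | cons t l ih =>
    intro s h hs
    simp only [List.foldl_cons]
    exact ih _ (fun u hu => h u (List.mem_cons_of_mem _ hu))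
      (h t List.mem_cons_self _ hs)

lemma filter_beq_of_nodup (pb : List Int) (v : Int) (h : pb.Nodup) :
    pb.filter (fun q => q == v) = if pb.contains v then [v] else [] := by
  induction pb with
  | nil => simp
  | cons a pb ih =>
    simp only [List.nodup_cons] at h
    by_cases hav : a = v
    · subst hav
      have : pb.filter (fun q => q == a) = [] := by
        rw [List.filter_eq_nil_iff]
        intro b hb
        simp only [beq_iff_eq]
        intro hba
        exact h.1 (hba ▸ hb)
      simp [this]
    · have := ih h.2
      simp only [List.filter_cons, List.contains_cons]
      simp [hav, this, Ne.symm hav]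

lemma fap_eq (pa pb : List Int) (h : pb.Nodup) :
    findAdjacentPositions pa pb
      = (pa.filter (fun p => pb.contains (p + 1))).map (fun p => p + 1) := by
  unfold findAdjacentPositions
  have h1 : ∀ (acc : List Int) (posA : Int),
      pb.foldl (fun adjacent posB => if posB == posA + 1 then adjacent ++ [posB] else adjacent) acc
        = if pb.contains (posA + 1) then acc ++ [posA + 1] else acc := by
    intro acc posA
    rw [PySem.List.foldl_append_if_eq_filter (fun posB => posB == posA + 1) pb acc,
        filter_beq_of_nodup pb _ h]
    split <;> simp
  simp only [h1]
  rw [PySem.List.foldl_append_if (fun p => pb.contains (p + 1)) (fun p => p + 1) pa []]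
  simp

lemma chain_eq (S : Int → PySem.Set Int) (hS : ∀ i, (S i).Nodup) :
    ∀ (n : Nat) (P : List Int),
      (PySem.List.pyRange 1 (1 + (n : Int)) 1).foldl (fun dp i => findAdjacentPositions dp (S i)) P
        = (P.filter (fun p => (List.range n).all
              (fun j => (S ((j : Int) + 1)).contains (p + (j : Int) + 1)))).map
            (fun p => p + (n : Int)) := by
  intro n
  induction n with
  | zero =>
    intro P
    rw [PySem.List.pyRange_one_eq_nil (by norm_num)]
    simp
  | succ n ih =>
    intro P
    simp only [PySem.Set.contains] at ih ⊢
    have e1 : (1 + ((n + 1 : Nat) : Int)) = (1 + (n : Int)) + 1 := by push_cast; ring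
    rw [e1, PySem.List.pyRange_one_succ_right (by omega), List.foldl_append]
    simp only [List.foldl_cons, List.foldl_nil]
    rw [ih P, fap_eq _ _ (hS _), List.filter_map, List.map_map, List.filter_filter]
    have e2 : (1 : Int) + (n : Int) = (n : Int) + 1 := by ring
    have hpred : ∀ p ∈ P,
        (((fun q => List.contains (S (1 + (n : Int))) (q + 1)) ∘ fun p => p + (n : Int)) p &&
            (List.range n).all (fun j => List.contains (S ((j : Int) + 1)) (p + (j : Int) + 1)))
          = (List.range (n + 1)).all (fun j => List.contains (S ((j : Int) + 1)) (p + (j : Int) + 1)) := by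
      intro p _
      rw [List.range_succ]
      simp only [Function.comp_apply, List.all_append, List.all_cons, List.all_nil, Bool.and_true]
      rw [Bool.and_comm, e2]
    rw [List.filter_congr hpred]
    apply List.map_congr_left
    intro p _
    simp only [Function.comp_apply]
    push_cast
    ring

lemma items_fold_mem (items : List (String × List Int)) (c : String × List Int → Bool)
    (r : PySem.Set String) (x : String) :
    x ∈ items.foldl (fun res it => if c it then PySem.Set.add res it.1 else res) r
      ↔ x ∈ r ∨ ∃ it ∈ items, c it = true ∧ x = it.1 := by
  apply mem_foldl_accum (Q := fun it y => c it = true ∧ y = it.1)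
  intro it _ s y
  by_cases hc : c it = true
  · simp [hc, PySem.Set.mem_add]
  · simp [hc]

lemma items_fold_nodup (items : List (String × List Int)) (c : String × List Int → Bool)
    (r : PySem.Set String) (h : r.Nodup) :
    (items.foldl (fun res it => if c it then PySem.Set.add res it.1 else res) r).Nodup := by
  apply nodup_foldl_accum _ _ _ _ h
  intro it _ s hs
  by_cases hc : c it = true
  · simpa [hc] using PySem.Set.nodup_add s it.1 hs
  · simpa [hc] using hs

lemma range_shift (L : Nat) :
    PySem.List.pyRange 1 (L : Int) 1 = PySem.List.pyRange 1 (1 + ((L - 1 : Nat) : Int)) 1 := by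
  rcases L with _ | L
  · rw [PySem.List.pyRange_one_eq_nil (by norm_num), PySem.List.pyRange_one_eq_nil (by norm_num)]
  · congr 1
    push_cast [Nat.succ_sub_one]
    ring

lemma condA_iff (inv : List (String × List (String × List Int))) (words : List String)
    (item : String × List Int) :
    (!((PySem.List.pyRange 1 (words.length : Int) 1).foldl
        (fun dp i => findAdjacentPositions dp
          (PySem.Set.ofList (PySem.Dict.getD
            (PySem.Dict.mk (PySem.Dict.getD (PySem.Dict.mk inv) (PySem.List.pyGetD words i "") []))
            item.1 []))) item.2).isEmpty) = true
      ↔ CondDoc inv words item := by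
  have hfold :
      (PySem.List.pyRange 1 (words.length : Int) 1).foldl
        (fun dp i => findAdjacentPositions dp
          (PySem.Set.ofList (PySem.Dict.getD
            (PySem.Dict.mk (PySem.Dict.getD (PySem.Dict.mk inv) (PySem.List.pyGetD words i "") []))
            item.1 []))) item.2
      = (PySem.List.pyRange 1 (words.length : Int) 1).foldl
          (fun dp i => findAdjacentPositions dp (posSetOf inv words item.1 i.toNat)) item.2 := by
    apply PySem.List.foldl_congr_mem
    intro dp i hi
    rw [PySem.List.mem_pyRange_one] at hi
    rw [PySem.List.pyGetD_eq_getElem words "" (by omega) hi.2]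
    unfold posSetOf
    rw [List.getD_eq_getElem words "" (by omega)]
  rw [hfold, range_shift words.length,
      chain_eq (fun i => posSetOf inv words item.1 i.toNat)
        (fun i => by unfold posSetOf; exact PySem.Set.nodup_ofList _) (words.length - 1) item.2]
  simp only [Bool.not_eq_eq_eq_not, Bool.not_true, List.isEmpty_eq_false_iff, ne_eq,
    List.map_eq_nil_iff, List.filter_eq_nil_iff, not_forall]
  unfold CondDoc
  constructor
  · rintro ⟨p, hp, hpred⟩
    rw [not_not, List.all_eq_true] at hpred
    refine ⟨p, hp, fun j hj => ?_⟩
    have := hpred j (List.mem_range.mpr (by omega))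
    rw [show ((j : Int) + 1).toNat = j + 1 from by omega] at this
    exact List.contains_iff_mem.mp this
  · rintro ⟨p, hp, hpred⟩
    refine ⟨p, hp, ?_⟩
    rw [not_not, List.all_eq_true]
    intro j hj
    rw [List.mem_range] at hj
    rw [show ((j : Int) + 1).toNat = j + 1 from by omega]
    exact List.contains_iff_mem.mpr (hpred j (by omega))

lemma condB_iff (inv : List (String × List (String × List Int))) (words : List String)
    (item : String × List Int) :
    (item.2.any (fun p =>
        (PySem.List.pyRange 0 ((((words.drop 1).map (fun w => PySem.Dict.getD (PySem.Dict.mk inv) w [])).map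
            (fun d => PySem.Set.ofList (PySem.Dict.getD (PySem.Dict.mk d) item.1 []))).length : Int) 1).all
          (fun i => PySem.Set.contains
            (PySem.List.pyGetD (((words.drop 1).map (fun w => PySem.Dict.getD (PySem.Dict.mk inv) w [])).map
              (fun d => PySem.Set.ofList (PySem.Dict.getD (PySem.Dict.mk d) item.1 []))) i PySem.Set.empty)
            (p + i + 1)))) = true
      ↔ CondDoc inv words item := by
  have hlen : (((words.drop 1).map (fun w => PySem.Dict.getD (PySem.Dict.mk inv) w [])).map
      (fun d => PySem.Set.ofList (PySem.Dict.getD (PySem.Dict.mk d) item.1 []))).length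
      = words.length - 1 := by
    simp
  have hposs : ∀ i : Int, 0 ≤ i → i < ((words.length - 1 : Nat) : Int) →
      PySem.List.pyGetD (((words.drop 1).map (fun w => PySem.Dict.getD (PySem.Dict.mk inv) w [])).map
        (fun d => PySem.Set.ofList (PySem.Dict.getD (PySem.Dict.mk d) item.1 []))) i PySem.Set.empty
      = posSetOf inv words item.1 (i.toNat + 1) := by
    intro i h0 h1
    have hL : i.toNat + 1 < words.length := by omega
    rw [PySem.List.pyGetD_eq_getElem _ PySem.Set.empty h0 (by rw [hlen]; omega)]
    simp only [List.getElem_map, List.getElem_drop,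
      show 1 + i.toNat = i.toNat + 1 from by omega]
    unfold posSetOf
    rw [List.getD_eq_getElem words "" hL]
  rw [List.any_eq_true]
  unfold CondDoc
  apply exists_congr
  intro p
  apply and_congr_right
  intro _
  rw [hlen, List.all_eq_true]
  constructor
  · intro h j hj
    have := h (j : Int) (PySem.List.mem_pyRange_one.mpr ⟨by omega, by omega⟩)
    rw [hposs (j : Int) (by omega) (by omega)] at this
    rw [show ((j : Int)).toNat + 1 = j + 1 from by omega] at this
    simpa [PySem.Set.contains, List.contains_iff_mem] using this
  · intro h i hi
    rw [PySem.List.mem_pyRange_one] at hi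
    rw [hposs i hi.1 hi.2]
    have hmem := h i.toNat (by omega)
    rw [show (p + (i.toNat : Int) + 1) = p + i + 1 from by omega] at hmem
    simpa [PySem.Set.contains, List.contains_iff_mem] using hmem

lemma findPositions_mem (phrase : String) (inv : List (String × List (String × List Int))) (x : String) :
    x ∈ findPositionsForPhrase phrase inv ↔ QTerm inv phrase x := by
  unfold findPositionsForPhrase QTerm
  by_cases hl : (PySem.Str.split₀ phrase).length = 1
  · simp only [hl, if_pos]
    exact PySem.Set.mem_ofList _ x
  · simp only [if_neg hl]
    refine Iff.trans (items_fold_mem _ _ _ _) ?_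
    rw [show (x ∈ (PySem.Set.empty : PySem.Set String)) = False from by
      simp [PySem.Set.empty], false_or]
    exact exists_congr fun item => and_congr_right fun _ =>
      and_congr_left fun _ => condA_iff inv (PySem.Str.split₀ phrase) item

lemma altStep_mem (inv : List (String × List (String × List Int))) (t : String)
    (r : PySem.Set String) (y : String) :
    y ∈ (fun result term =>
        let words := PySem.Str.split₀ term
        if words.length = 1 then
          PySem.Set.update result (PySem.Dict.mk (PySem.Dict.getD (PySem.Dict.mk inv) term [])).keys
        else
          let offsetDicts := (words.drop 1).map (fun w => PySem.Dict.getD (PySem.Dict.mk inv) w [])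
          (PySem.Dict.mk (PySem.Dict.getD (PySem.Dict.mk inv) (PySem.List.pyGetD words 0 "") [])).items.foldl
            (fun result item =>
              let possets := offsetDicts.map (fun d =>
                PySem.Set.ofList (PySem.Dict.getD (PySem.Dict.mk d) item.1 []))
              if item.2.any (fun p =>
                   (PySem.List.pyRange 0 (possets.length : Int) 1).all (fun i =>
                     PySem.Set.contains (PySem.List.pyGetD possets i PySem.Set.empty) (p + i + 1)))
              then PySem.Set.add result item.1 else result)
            result) r t
      ↔ y ∈ r ∨ QTerm inv t y := by
  simp only []
  unfold QTerm
  by_cases hl : (PySem.Str.split₀ t).length = 1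
  · simp only [hl, if_pos]
    exact PySem.Set.mem_update _ _ y
  · simp only [if_neg hl]
    refine Iff.trans (items_fold_mem _ _ _ _) ?_
    exact or_congr_right (exists_congr fun item => and_congr_right fun _ =>
      and_congr_left fun _ => condB_iff inv (PySem.Str.split₀ t) item)

lemma altStep_nodup (inv : List (String × List (String × List Int))) (t : String)
    (r : PySem.Set String) (hr : r.Nodup) :
    ((fun result term =>
        let words := PySem.Str.split₀ term
        if words.length = 1 then
          PySem.Set.update result (PySem.Dict.mk (PySem.Dict.getD (PySem.Dict.mk inv) term [])).keys
        else
          let offsetDicts := (words.drop 1).map (fun w => PySem.Dict.getD (PySem.Dict.mk inv) w [])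
          (PySem.Dict.mk (PySem.Dict.getD (PySem.Dict.mk inv) (PySem.List.pyGetD words 0 "") [])).items.foldl
            (fun result item =>
              let possets := offsetDicts.map (fun d =>
                PySem.Set.ofList (PySem.Dict.getD (PySem.Dict.mk d) item.1 []))
              if item.2.any (fun p =>
                   (PySem.List.pyRange 0 (possets.length : Int) 1).all (fun i =>
                     PySem.Set.contains (PySem.List.pyGetD possets i PySem.Set.empty) (p + i + 1)))
              then PySem.Set.add result item.1 else result)
            result) r t : PySem.Set String).Nodup := by
  simp only []
  by_cases hl : (PySem.Str.split₀ t).length = 1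
  · simp only [hl, if_pos]
    exact PySem.Set.nodup_update _ _ hr
  · simp only [if_neg hl]
    exact items_fold_nodup _ _ _ hr

-- ===== VERDICT (by name: the statement is the Claim_ definition above) =====
theorem qOr_spec : Claim_equal_qOr := by
  unfold Claim_equal_qOr
  intro inv terms _ _
  unfold Spec_qOr
  simp only [qOr, qOr_alt]
  by_cases h0 : PySem.List.pyGetD terms 0 "" = ""
  · rw [if_pos h0, if_neg (by simp [h0])]
    exact (PySem.List.sorted_eq_nil_iff _ _ _).mpr rfl
  · rw [if_neg h0, if_pos (by simpa using h0)]
    apply PySem.List.sorted_eq_sorted_of_perm _ _ (fun x : String => x) (fun _ _ h => h)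
    rw [List.perm_ext_iff_of_nodup
      (nodup_foldl_accum _ terms PySem.Set.empty
        (fun t _ r hr => PySem.Set.nodup_union _ _ hr) List.nodup_nil)
      (nodup_foldl_accum _ terms PySem.Set.empty
        (fun t _ r hr => altStep_nodup inv t r hr) List.nodup_nil)]
    intro y
    rw [mem_foldl_accum _ (fun t x => QTerm inv t x) terms _ y
        (fun t _ r z => Iff.trans (PySem.Set.mem_union _ _ z)
          (or_congr_right (findPositions_mem t inv z))),
        mem_foldl_accum _ (fun t x => QTerm inv t x) terms _ y
        (fun t _ r z => altStep_mem inv t r z)]
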